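-- pv_equiv track=rewrite | github.com/integerQuant/ddstats | tests/test_ddstats.py | rolling_bounds_py
-- ===== SOURCE A (Python) =====
-- def rolling_bounds_py(n: int, window: int, min_window: int, step: int) -> list[tuple[int, int]]:
--     if n == 0 or min_window == 0 or step == 0 or n < min_window:
--         return []
--     bounds = []
--     max_window_i = n - min_window + 1
--     for i in range(0, max_window_i, step):
--         if i < max(window - min_window, 0):
--             i_window = min_window + i
--             start_i = 0
--         else:
--             i_window = window
--             start_i = i - (window - min_window)
--         end_i = start_i + i_window
--         if end_i > n:
--             break
--         bounds.append((start_i, end_i))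
--     return bounds
-- ===== SOURCE B (Python) =====
-- def rolling_bounds_py(n: int, window: int, min_window: int, step: int) -> list[tuple[int, int]]:
--     if n == 0 or min_window == 0 or step == 0 or n < min_window or step < 0:
--         return []
--     T = max(window - min_window, 0)
--     stop = n - min_window + 1
--     ramp = [(0, min_window + i) for i in range(0, min(T, stop), step)]
--     first = -(-T // step) * step  # smallest multiple of step that is >= T
--     slide = [(i - (window - min_window), i + min_window)
--              for i in range(first, stop, step)]
--     return ramp + slide
-- ===== Notes on version B (the rewrite author's own statement) =====
-- stated objective: alternative
-- what changed: Replaced A's single loop (per-iteration phase test plus a break that can never fire) by two explicit comprehension passes: a ramp pass over range(0, min(T, stop), step) and a slide pass starting at the first multiple of step >= T computed by ceiling division, concatenated.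
import Mathlib
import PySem

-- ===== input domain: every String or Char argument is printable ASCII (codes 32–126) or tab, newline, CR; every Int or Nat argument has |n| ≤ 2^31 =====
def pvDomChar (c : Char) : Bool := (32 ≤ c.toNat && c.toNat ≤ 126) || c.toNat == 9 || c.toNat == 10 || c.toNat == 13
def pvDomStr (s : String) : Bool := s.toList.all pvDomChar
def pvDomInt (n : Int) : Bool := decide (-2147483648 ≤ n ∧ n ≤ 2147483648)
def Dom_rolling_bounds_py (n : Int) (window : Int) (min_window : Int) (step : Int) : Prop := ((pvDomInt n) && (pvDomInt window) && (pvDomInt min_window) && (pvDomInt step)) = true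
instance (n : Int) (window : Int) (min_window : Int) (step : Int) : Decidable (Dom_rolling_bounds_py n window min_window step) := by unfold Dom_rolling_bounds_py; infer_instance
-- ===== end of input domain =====

-- Header: B replaces A's single guarded loop (with a dead break) by two explicit
-- comprehension passes — a ramp phase and a slide phase — over the same stride;
-- objective: alternative decomposition (same cost).


-- ===== PORT A =====
-- loop body of A, with the 'break' (end_i > n → stop, return bounds)
def pvA_loop (n window min_window : Int) : List Int → List (Int × Int) → List (Int × Int)
  | [], bounds => bounds
  | i :: rest, bounds =>
      let p := if i < max (window - min_window) 0
               then (min_window + i, (0 : Int))        -- (i_window, start_i)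
               else (window, i - (window - min_window))
      let end_i := p.2 + p.1
      if end_i > n then bounds
      else pvA_loop n window min_window rest (bounds ++ [(p.2, end_i)])

def rolling_bounds_py (n : Int) (window : Int) (min_window : Int) (step : Int) : List (Int × Int) :=
  if n = 0 ∨ min_window = 0 ∨ step = 0 ∨ n < min_window then []
  else
    let max_window_i := n - min_window + 1
    pvA_loop n window min_window (PySem.List.pyRange 0 max_window_i step) []

-- ===== PORT B =====
def rolling_bounds_py_alt (n : Int) (window : Int) (min_window : Int) (step : Int) : List (Int × Int) :=
  if n = 0 ∨ min_window = 0 ∨ step = 0 ∨ n < min_window ∨ step < 0 then []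
  else
    let T := max (window - min_window) 0
    let stop := n - min_window + 1
    let ramp := (PySem.List.pyRange 0 (min T stop) step).map (fun i => ((0 : Int), min_window + i))
    let first := -(PySem.Int.floordiv (-T) step) * step  -- smallest multiple of step ≥ T
    let slide := (PySem.List.pyRange first stop step).map
                   (fun i => (i - (window - min_window), i + min_window))
    ramp ++ slide

-- ===== PRECONDITION & SPEC =====
def Spec_rolling_bounds_py (n : Int) (window : Int) (min_window : Int) (step : Int) (out : List (Int × Int)) : Prop := out = rolling_bounds_py_alt n window min_window step
instance (n : Int) (window : Int) (min_window : Int) (step : Int) (out : List (Int × Int)) : Decidable (Spec_rolling_bounds_py n window min_window step out) := by unfold Spec_rolling_bounds_py; infer_instance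

-- ===== CLAIM (what is proved, stated in full; the proofs are below) =====
def Claim_equal_rolling_bounds_py : Prop := ∀ (n : Int) (window : Int) (min_window : Int) (step : Int), Dom_rolling_bounds_py n window min_window step → Spec_rolling_bounds_py n window min_window step (rolling_bounds_py n window min_window step)

-- ===== LEMMAS AND PROOFS =====

-- The break never fires on a range whose elements stay below stop = n - min_window + 1:
-- A's loop is then just a map of the phase function over the range.
theorem pvA_loop_eq_map (n window min_window : Int) (xs : List Int)
    (hx : ∀ i ∈ xs, i ≤ n - min_window) (acc : List (Int × Int)) :
    pvA_loop n window min_window xs acc =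
      acc ++ xs.map (fun i =>
        if i < max (window - min_window) 0
        then ((0 : Int), min_window + i)
        else (i - (window - min_window), i + min_window)) := by
  induction xs generalizing acc with
  | nil => simp [pvA_loop]
  | cons i rest ih =>
      have hi : i ≤ n - min_window := hx i (by simp)
      have hrest : ∀ j ∈ rest, j ≤ n - min_window := fun j hj => hx j (by simp [hj])
      by_cases hb : i < max (window - min_window) 0
      · simp only [pvA_loop, if_pos hb]
        have hnb : ¬ ((0 : Int) + (min_window + i) > n) := by omega
        rw [if_neg hnb, ih hrest, List.map_cons, if_pos hb]
        simp
      · simp only [pvA_loop, if_neg hb]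
        have hnb : ¬ (i - (window - min_window) + window > n) := by omega
        rw [if_neg hnb, ih hrest, List.map_cons, if_neg hb]
        have h2 : i - (window - min_window) + window = i + min_window := by ring
        simp [h2]

-- cancel a positive factor from a two-sided bound
theorem pv_mul_cancel (step d : Int) (hs : 0 < step) (h1 : -step < step * d) (h2 : step * d < step) : d = 0 := by
  have a1 : (-1 : Int) < d := by nlinarith
  have a2 : d < 1 := by nlinarith
  omega

-- ceiling bracket for the count pyRange uses
theorem pv_count_bracket (step x : Int) (hs : 0 < step) :
    x ≤ step * ((x + step - 1) / step) ∧ step * ((x + step - 1) / step) < x + step := by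
  have hmod := Int.emod_nonneg (x + step - 1) (by omega : step ≠ 0)
  have hmod2 := Int.emod_lt_of_pos (x + step - 1) hs
  have hdm := Int.mul_ediv_add_emod (x + step - 1) step
  constructor <;> omega

-- the main splitting identity: one strided range, mapped with the two-phase
-- function, splits into a ramp part (below T) and a slide part (from q*step,
-- the smallest multiple of step that is ≥ T)
theorem pv_split (window min_window step T stop q : Int) (hs : 0 < step)
    (hT0 : 0 ≤ T) (hstop0 : 0 < stop)
    (hq1 : (q - 1) * step < T) (hq2 : T ≤ q * step) :
    (PySem.List.pyRange 0 stop step).map (fun i =>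
        if i < T
        then ((0 : Int), min_window + i)
        else (i - (window - min_window), i + min_window)) =
      (PySem.List.pyRange 0 (min T stop) step).map
          (fun i => ((0 : Int), min_window + i)) ++
      (PySem.List.pyRange (q * step) stop step).map
          (fun i => (i - (window - min_window), i + min_window)) := by
  have e2 : q * step = step * q := mul_comm q step
  have e1 : (q - 1) * step = q * step - step := sub_one_mul q step
  have hq0 : 0 ≤ q := by
    by_contra hneg
    have : q ≤ -1 := by omega
    nlinarith [hq2]
  rw [PySem.List.pyRange_of_pos 0 stop hs, PySem.List.pyRange_of_pos 0 (min T stop) hs,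
      PySem.List.pyRange_of_pos (q * step) stop hs]
  simp only [sub_zero, List.map_map]
  set a0 : Int := (stop + step - 1) / step with ha0def
  have hA := pv_count_bracket step stop hs
  rw [← ha0def] at hA
  have ha0pos : 0 < a0 := by nlinarith [hA.1]
  by_cases hts : stop ≤ T
  · -- slide phase empty: the whole range is ramp
    have hmin : min T stop = stop := min_eq_right hts
    have hqs : ¬ (q * step < stop) := by omega
    rw [hmin, if_pos hstop0, if_neg hqs]
    simp only [List.range_zero, List.map_nil, List.append_nil]
    apply List.map_congr_left
    intro k hk
    rw [List.mem_range] at hk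
    have hki : (k : Int) < a0 := by omega
    have hlt : step * (k : Int) < stop := by nlinarith [hA.2]
    simp only [Function.comp_apply]
    rw [if_pos (show (0 : Int) + step * (k : Int) < T by omega)]
  · have htlt : T < stop := by omega
    have hmin : min T stop = T := min_eq_left (by omega)
    rw [hmin, if_pos hstop0]
    by_cases hT : 0 < T
    · -- genuine ramp: a1 = q
      rw [if_pos hT]
      set a1 : Int := (T + step - 1) / step with ha1def
      have hB := pv_count_bracket step T hs
      rw [← ha1def] at hB
      have ha1q : a1 = q := by
        have h0 : a1 - q = 0 := by
          apply pv_mul_cancel step (a1 - q) hs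
          · rw [mul_sub]; omega
          · rw [mul_sub]; omega
        omega
      have ha1pos : 0 < a1 := by nlinarith [hB.1]
      by_cases hqs : q * step < stop
      · rw [if_pos hqs]
        set a2 : Int := (stop - q * step + step - 1) / step with ha2def
        have hC := pv_count_bracket step (stop - q * step) hs
        rw [← ha2def] at hC
        have ha2pos : 0 < a2 := by nlinarith [hC.1]
        have hsum : a0 = a1 + a2 := by
          rw [ha1q]
          have h0 : a0 - (q + a2) = 0 := by
            apply pv_mul_cancel step (a0 - (q + a2)) hs
            · rw [mul_sub, mul_add]; omega
            · rw [mul_sub, mul_add]; omega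
          omega
        have hNat : a0.toNat = a1.toNat + a2.toNat := by omega
        rw [hNat, List.range_add, List.map_append, List.map_map]
        congr 1
        · apply List.map_congr_left
          intro k hk
          rw [List.mem_range] at hk
          have hki : (k : Int) < a1 := by omega
          have hlt : step * (k : Int) < T := by nlinarith [hB.2]
          simp only [Function.comp_apply]
          rw [if_pos (show (0 : Int) + step * (k : Int) < T by omega)]
        · apply List.map_congr_left
          intro k hk
          rw [List.mem_range] at hk
          simp only [Function.comp_apply]
          have hcast : ((a1.toNat + k : Nat) : Int) = a1 + (k : Int) := by omega
          rw [hcast]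
          have hi : (0 : Int) + step * (a1 + (k : Int)) = q * step + step * (k : Int) := by
            rw [zero_add, mul_add, ha1q, ← e2]
          rw [hi]
          have hge : ¬ (q * step + step * (k : Int) < T) := by
            have hk0 : 0 ≤ step * (k : Int) := by positivity
            omega
          rw [if_neg hge]
      · rw [if_neg hqs]
        simp only [List.range_zero, List.map_nil, List.append_nil]
        have hqa0 : q = a0 := by
          have h0 : q - a0 = 0 := by
            apply pv_mul_cancel step (q - a0) hs
            · rw [mul_sub]; omega
            · rw [mul_sub]; omega
          omega
        rw [show a1.toNat = a0.toNat by omega]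
        apply List.map_congr_left
        intro k hk
        rw [List.mem_range] at hk
        have hki : (k : Int) < a1 := by omega
        have hlt : step * (k : Int) < T := by nlinarith [hB.2]
        simp only [Function.comp_apply]
        rw [if_pos (show (0 : Int) + step * (k : Int) < T by omega)]
    · -- T = 0: no ramp, slide starts at 0
      have hTz : T = 0 := by omega
      have hqz : q = 0 := by
        have h0 : q - 0 = 0 := by
          apply pv_mul_cancel step (q - 0) hs
          · rw [sub_zero]; omega
          · rw [sub_zero]; omega
        omega
      rw [if_neg hT, hqz, zero_mul]
      simp only [List.range_zero, List.map_nil, List.nil_append, sub_zero]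
      rw [if_pos hstop0]
      apply List.map_congr_left
      intro k hk
      rw [List.mem_range] at hk
      simp only [Function.comp_apply]
      have hge : ¬ ((0 : Int) + step * (k : Int) < T) := by
        have hk0 : 0 ≤ step * (k : Int) := by positivity
        omega
      rw [if_neg hge]

theorem rolling_bounds_py_spec : Claim_equal_rolling_bounds_py := by
  intro n window min_window step _hdom
  unfold Spec_rolling_bounds_py
  show rolling_bounds_py n window min_window step = rolling_bounds_py_alt n window min_window step
  by_cases hg : n = 0 ∨ min_window = 0 ∨ step = 0 ∨ n < min_window
  · rw [rolling_bounds_py, rolling_bounds_py_alt, if_pos hg, if_pos (by tauto)]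
  · push Not at hg
    obtain ⟨h1, h2, h3, h4⟩ := hg
    have hgneg : ¬ (n = 0 ∨ min_window = 0 ∨ step = 0 ∨ n < min_window) := by
      push Not; exact ⟨h1, h2, h3, h4⟩
    rw [rolling_bounds_py, rolling_bounds_py_alt, if_neg hgneg]
    by_cases hsneg : step < 0
    · rw [if_pos (by tauto)]
      have hempty : PySem.List.pyRange 0 (n - min_window + 1) step = [] := by
        simp [PySem.List.pyRange, h3, show ¬ (0 : Int) < step by omega,
              show ¬ (n - min_window + 1 < 0) by omega]
      simp only [hempty]
      rfl
    · have hs : 0 < step := by omega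
      rw [if_neg (by push Not; exact ⟨h1, h2, h3, h4, by omega⟩)]
      have hx : ∀ i ∈ PySem.List.pyRange 0 (n - min_window + 1) step, i ≤ n - min_window := by
        intro i hi
        have := (PySem.List.mem_pyRange_iff_of_pos hs i).mp hi
        omega
      simp only []
      rw [pvA_loop_eq_map n window min_window _ hx []]
      simp only [List.nil_append]
      have hq := (PySem.Int.neg_floordiv_neg_eq_iff_of_pos
        (a := max (window - min_window) 0) (b := step) hs).mp rfl
      exact pv_split window min_window step (max (window - min_window) 0)
        (n - min_window + 1) (-(PySem.Int.floordiv (-(max (window - min_window) 0)) step))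
        hs (le_max_right _ _) (by omega) hq.1 hq.2
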